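-- pv_equiv track=rewrite | github.com/proplayer5555/Algorithms-AI2 | WKST_HEU.py | delete_clause
-- ===== SOURCE A (Python) =====
-- def delete_clause(atemp,symbol,score):
--     P=len(atemp)
--     sizechanged = False
--     for s in range (P-score): #removes as many literals as N-score
--         for r in range(len(atemp)):
--             if (sizechanged):
--                 sizechanged = False
--                 break
--             for c in range(3):
--                 slot1 = atemp[r][c] #slot -> -1 1 6 ktlp
--
--                 if (symbol == slot1): #check if symbol == every symbol in the literal
--                     atemp.pop(r)
--                     sizechanged = True
--                     break
--
--     return atemp
-- ===== SOURCE B (Python) =====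
-- def delete_clause(atemp, symbol, score):
--     # Single pass with a removal budget instead of A's repeated front rescans.
--     k = len(atemp) - score
--     kept = []
--     for cl in atemp:
--         if k > 0 and (symbol == cl[0] or symbol == cl[1] or symbol == cl[2]):
--             k -= 1
--         else:
--             kept.append(cl)
--     atemp[:] = kept
--     return atemp
-- ===== Notes on version B (the rewrite author's own statement) =====
-- stated objective: simpler
-- what changed: A repeatedly rescans the list from the front, popping the first matching clause once per removal pass; B makes a single pass with a removal budget, keeping non-removed clauses, then writes the result back in place.
import Mathlib
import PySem

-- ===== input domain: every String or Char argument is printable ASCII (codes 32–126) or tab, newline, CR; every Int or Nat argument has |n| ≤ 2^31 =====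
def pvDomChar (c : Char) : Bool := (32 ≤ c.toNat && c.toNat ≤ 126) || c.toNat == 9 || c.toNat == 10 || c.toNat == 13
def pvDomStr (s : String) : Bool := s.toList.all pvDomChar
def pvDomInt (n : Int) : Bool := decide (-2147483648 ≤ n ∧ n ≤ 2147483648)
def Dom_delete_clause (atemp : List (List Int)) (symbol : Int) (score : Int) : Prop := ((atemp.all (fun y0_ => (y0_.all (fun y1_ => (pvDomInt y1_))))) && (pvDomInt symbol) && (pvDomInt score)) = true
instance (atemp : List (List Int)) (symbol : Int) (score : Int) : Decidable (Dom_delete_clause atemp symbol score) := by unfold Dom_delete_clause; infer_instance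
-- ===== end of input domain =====

-- B replaces A's (len-score) repeated front-to-back rescans by ONE pass with a removal
-- budget; equivalence is about the returned list (both Pythons mutate atemp to the same
-- final content in place).

-- ===== PORT A =====
-- inner 'for c in range(3)' loop: slot1 = atemp[r][c]; break on symbol == slot1
def pvHitA (symbol : Int) (row : List Int) : Bool :=
  (PySem.List.pyRange 0 3 1).any (fun c => symbol == (PySem.List.pyGet? row c).getD 0)

-- middle 'for r in range(len(atemp))' loop: scan rows from the front, pop the first
-- matching row, then the 'sizechanged' flag breaks out of the r-loop
def pvPopFirstHit (symbol : Int) : List (List Int) → List (List Int)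
  | [] => []
  | row :: rest => if pvHitA symbol row then rest else row :: pvPopFirstHit symbol rest

def delete_clause (atemp : List (List Int)) (symbol : Int) (score : Int) : List (List Int) :=
  (PySem.List.pyRange 0 ((atemp.length : Int) - score) 1).foldl
    (fun acc _ => pvPopFirstHit symbol acc) atemp

-- ===== PORT B =====
-- 'symbol == cl[0] or symbol == cl[1] or symbol == cl[2]'
def pvHitB (symbol : Int) (cl : List Int) : Bool :=
  symbol == (PySem.List.pyGet? cl 0).getD 0 ||
  symbol == (PySem.List.pyGet? cl 1).getD 0 ||
  symbol == (PySem.List.pyGet? cl 2).getD 0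

def delete_clause_alt (atemp : List (List Int)) (symbol : Int) (score : Int) : List (List Int) :=
  (atemp.foldl
    (fun (st : Int × List (List Int)) cl =>
      if st.1 > 0 && pvHitB symbol cl then (st.1 - 1, st.2) else (st.1, st.2 ++ [cl]))
    ((atemp.length : Int) - score, [])).2

-- ===== PRECONDITION & SPEC =====
-- Pre_ holds exactly where Python A returns: A raises IndexError iff some clause with
-- fewer than 3 slots and not containing the symbol is reached while removals remain,
-- i.e. while fewer than len-score matching clauses precede it.
def Pre_delete_clause (atemp : List (List Int)) (symbol : Int) (score : Int) : Prop :=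
  ∀ pr ∈ atemp.zipIdx, (pr.1.length < 3 ∧ symbol ∉ pr.1) →
    (atemp.length : Int) - score ≤ (((atemp.take pr.2).countP (fun cl => symbol ∈ cl.take 3) : Nat) : Int)
instance (atemp : List (List Int)) (symbol : Int) (score : Int) : Decidable (Pre_delete_clause atemp symbol score) := by unfold Pre_delete_clause; infer_instance
def pvWitness_delete_clause : List (List Int) × Int × Int := ([[1, 2, 3], [4, 5, 6], [1, 7, 8]], 1, 1)

def Spec_delete_clause (atemp : List (List Int)) (symbol : Int) (score : Int) (out : List (List Int)) : Prop := out = delete_clause_alt atemp symbol score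
instance (atemp : List (List Int)) (symbol : Int) (score : Int) (out : List (List Int)) : Decidable (Spec_delete_clause atemp symbol score out) := by unfold Spec_delete_clause; infer_instance

-- ===== CLAIM (what is proved, stated in full; the proofs are below) =====
def Claim_equal_delete_clause : Prop := ∀ (atemp : List (List Int)) (symbol : Int) (score : Int), Dom_delete_clause atemp symbol score → Pre_delete_clause atemp symbol score → Spec_delete_clause atemp symbol score (delete_clause atemp symbol score)

-- ===== LEMMAS AND PROOFS =====

-- common reference form: remove the first k matching clauses in one structural pass
def pvRem (symbol : Int) : Int → List (List Int) → List (List Int)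
  | _, [] => []
  | k, cl :: rest =>
    if k > 0 && pvHitB symbol cl then pvRem symbol (k - 1) rest else cl :: pvRem symbol k rest

theorem pvHitA_eq_pvHitB (symbol : Int) (row : List Int) : pvHitA symbol row = pvHitB symbol row := by
  have h : PySem.List.pyRange 0 3 1 = [0, 1, 2] := by decide
  simp [pvHitA, pvHitB, h, List.any, Bool.or_assoc]

theorem pvRem_nonpos (symbol : Int) (k : Int) (xs : List (List Int)) (hk : k ≤ 0) :
    pvRem symbol k xs = xs := by
  induction xs with
  | nil => rfl
  | cons cl rest ih =>
    have : ¬ (k > 0) := by omega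
    simp [pvRem, this, ih]

theorem pvRem_pop (symbol : Int) (k : Int) (xs : List (List Int)) (hk : 0 ≤ k) :
    pvRem symbol k (pvPopFirstHit symbol xs) = pvRem symbol (k + 1) xs := by
  induction xs generalizing k with
  | nil => rfl
  | cons cl rest ih =>
    by_cases h : pvHitB symbol cl
    · simp [pvPopFirstHit, pvHitA_eq_pvHitB, h, pvRem, show k + 1 > 0 by omega]
    · simp [pvPopFirstHit, pvHitA_eq_pvHitB, h, pvRem, ih k hk]

theorem pvFoldPop_eq_pvRem (symbol : Int) (l : List Int) (xs : List (List Int)) :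
    l.foldl (fun acc _ => pvPopFirstHit symbol acc) xs = pvRem symbol (l.length : Int) xs := by
  induction l generalizing xs with
  | nil => exact (pvRem_nonpos symbol 0 xs le_rfl).symm
  | cons c l ih =>
    simp only [List.foldl_cons, ih, List.length_cons]
    rw [pvRem_pop symbol (l.length : Int) xs (by positivity)]
    norm_num

theorem pvRem_toNat (symbol : Int) (k : Int) (xs : List (List Int)) :
    pvRem symbol ((k.toNat : Nat) : Int) xs = pvRem symbol k xs := by
  by_cases hk : 0 ≤ k
  · rw [Int.toNat_of_nonneg hk]
  · rw [pvRem_nonpos symbol _ xs (by omega), pvRem_nonpos symbol k xs (by omega)]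

theorem pvFoldB_eq_pvRem (symbol : Int) (xs : List (List Int)) (k : Int) (acc : List (List Int)) :
    (xs.foldl
      (fun (st : Int × List (List Int)) cl =>
        if st.1 > 0 && pvHitB symbol cl then (st.1 - 1, st.2) else (st.1, st.2 ++ [cl]))
      (k, acc)).2 = acc ++ pvRem symbol k xs := by
  induction xs generalizing k acc with
  | nil => simp [pvRem]
  | cons cl rest ih =>
    rw [List.foldl_cons]
    by_cases h : (decide (k > 0) && pvHitB symbol cl) = true
    · rw [if_pos h, ih]
      simp only [pvRem]
      rw [if_pos h]
    · rw [if_neg h, ih]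
      simp only [pvRem]
      rw [if_neg h]
      simp

theorem delete_clause_eq_alt (atemp : List (List Int)) (symbol : Int) (score : Int) :
    delete_clause atemp symbol score = delete_clause_alt atemp symbol score := by
  rw [delete_clause, delete_clause_alt, pvFoldPop_eq_pvRem, pvFoldB_eq_pvRem,
    PySem.List.length_pyRange_one, List.nil_append, pvRem_toNat, sub_zero]

-- ===== VERDICT (by name: the statement is the Claim_ definition above) =====
theorem delete_clause_spec : Claim_equal_delete_clause := by
  intro atemp symbol score _ _
  unfold Spec_delete_clause
  exact delete_clause_eq_alt atemp symbol score
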